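-- pv_equiv track=rewrite | github.com/yuksel-arslan/SmartCon360 | services/ai-service/src/modules/bim/infrastructure/classification_mapper.py | _find_material_key
-- ===== SOURCE A (Python) =====
-- from typing import Optional
--
-- def _find_material_key(
--     entity_map: dict[str, dict[str, str]], material: str
-- ) -> Optional[str]:
--     """Find the best matching material key in the entity mapping.
--
--     Supports prefix matching: "material:Concrete" matches material "Concrete C30/37".
--     """
--     material_lower = material.lower()
--
--     # Exact match first
--     for key in entity_map:
--         if key == "default":
--             continue
--         if key.startswith("material:"):
--             mat_pattern = key[len("material:"):].lower()
--             if material_lower == mat_pattern: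
--                 return key
--
--     # Prefix / contains match
--     for key in entity_map:
--         if key == "default":
--             continue
--         if key.startswith("material:"):
--             mat_pattern = key[len("material:"):].lower()
--             if mat_pattern in material_lower or material_lower.startswith(mat_pattern):
--                 return key
--
--     return None
-- ===== SOURCE B (Python) =====
-- from typing import Optional
--
-- def _find_material_key(
--     entity_map: dict[str, dict[str, str]], material: str
-- ) -> Optional[str]:
--     """Single pass: return the first exact match immediately; otherwise
--     remember the first prefix/contains match as a fallback."""
--     material_lower = material.lower()
--     fallback = None
--     for key in entity_map:
--         if key == "default" or not key.startswith("material:"):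
--             continue
--         mat_pattern = key[len("material:"):].lower()
--         if material_lower == mat_pattern:
--             return key
--         if fallback is None and (mat_pattern in material_lower
--                                  or material_lower.startswith(mat_pattern)):
--             fallback = key
--     return fallback
-- ===== Notes on version B (the rewrite author's own statement) =====
-- stated objective: simpler
-- what changed: Replaces A's two separate full scans (exact pass, then prefix/contains pass) with one single loop that returns an exact match immediately and keeps the first prefix/contains match in a fallback variable.
import Mathlib
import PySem

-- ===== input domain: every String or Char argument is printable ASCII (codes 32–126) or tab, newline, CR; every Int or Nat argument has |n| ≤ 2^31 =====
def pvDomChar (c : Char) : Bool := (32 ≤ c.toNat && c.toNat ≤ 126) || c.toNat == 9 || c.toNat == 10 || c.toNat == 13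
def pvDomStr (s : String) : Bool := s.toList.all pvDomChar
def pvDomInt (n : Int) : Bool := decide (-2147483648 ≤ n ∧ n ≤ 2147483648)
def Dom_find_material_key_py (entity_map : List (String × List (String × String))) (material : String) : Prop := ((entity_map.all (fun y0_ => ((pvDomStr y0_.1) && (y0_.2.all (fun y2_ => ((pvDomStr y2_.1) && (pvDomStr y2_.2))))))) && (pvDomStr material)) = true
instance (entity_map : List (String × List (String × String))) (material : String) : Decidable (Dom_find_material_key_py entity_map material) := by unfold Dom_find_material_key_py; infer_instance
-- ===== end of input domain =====

-- Header: B replaces A's two full scans (exact pass, then prefix/contains pass) by one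
-- single loop that returns an exact match immediately and keeps the first
-- prefix/contains match as a fallback; same result, proved equivalent.

-- ===== PORT A =====
-- first pass of A: exact match
def fmkExactPass (material_lower : String) : List (String × List (String × String)) → Option String
  | [] => none
  | (key, _) :: rest =>
    if key == "default" then fmkExactPass material_lower rest
    else if PySem.Str.startswith key "material:" then
      let mat_pattern := PySem.Str.lower (PySem.Str.slice key (some 9) none)
      if material_lower == mat_pattern then some key
      else fmkExactPass material_lower rest
    else fmkExactPass material_lower rest

-- second pass of A: prefix / contains match
def fmkPrefixPass (material_lower : String) : List (String × List (String × String)) → Option String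
  | [] => none
  | (key, _) :: rest =>
    if key == "default" then fmkPrefixPass material_lower rest
    else if PySem.Str.startswith key "material:" then
      let mat_pattern := PySem.Str.lower (PySem.Str.slice key (some 9) none)
      if PySem.Str.isIn mat_pattern material_lower
          || PySem.Str.startswith material_lower mat_pattern then some key
      else fmkPrefixPass material_lower rest
    else fmkPrefixPass material_lower rest

def find_material_key_py (entity_map : List (String × List (String × String))) (material : String) : Option String :=
  let material_lower := PySem.Str.lower material
  match fmkExactPass material_lower entity_map with
  | some key => some key
  | none =>
    match fmkPrefixPass material_lower entity_map with
    | some key => some key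
    | none => none

-- ===== PORT B =====
-- single loop with a fallback accumulator (Source B)
def fmkLoop (material_lower : String) : List (String × List (String × String)) → Option String → Option String
  | [], fallback => fallback
  | (key, _) :: rest, fallback =>
    if key == "default" || !(PySem.Str.startswith key "material:") then
      fmkLoop material_lower rest fallback
    else
      let mat_pattern := PySem.Str.lower (PySem.Str.slice key (some 9) none)
      if material_lower == mat_pattern then some key
      else if fallback == none
          && (PySem.Str.isIn mat_pattern material_lower
              || PySem.Str.startswith material_lower mat_pattern) then
        fmkLoop material_lower rest (some key)
      else fmkLoop material_lower rest fallback

def find_material_key_py_alt (entity_map : List (String × List (String × String))) (material : String) : Option String :=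
  fmkLoop (PySem.Str.lower material) entity_map none

-- ===== PRECONDITION & SPEC =====
def Spec_find_material_key_py (entity_map : List (String × List (String × String))) (material : String) (out : Option String) : Prop := out = find_material_key_py_alt entity_map material
instance (entity_map : List (String × List (String × String))) (material : String) (out : Option String) : Decidable (Spec_find_material_key_py entity_map material out) := by unfold Spec_find_material_key_py; infer_instance

-- ===== CLAIM (what is proved, stated in full; the proofs are below) =====
def Claim_equal_find_material_key_py : Prop := ∀ (entity_map : List (String × List (String × String))) (material : String), Dom_find_material_key_py entity_map material → Spec_find_material_key_py entity_map material (find_material_key_py entity_map material)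

-- ===== LEMMAS AND PROOFS =====

-- loop invariant: B's single loop equals exact-pass, else fallback, else prefix-pass
theorem fmkLoop_eq (ml : String) (l : List (String × List (String × String)))
    (fb : Option String) :
    fmkLoop ml l fb =
      match fmkExactPass ml l with
      | some k => some k
      | none =>
        match fb with
        | some f => some f
        | none => fmkPrefixPass ml l := by
  induction l generalizing fb with
  | nil => cases fb <;> simp [fmkLoop, fmkExactPass, fmkPrefixPass]
  | cons p rest ih =>
    obtain ⟨key, v⟩ := p
    by_cases hd : key = "default"
    · simp [fmkLoop, fmkExactPass, fmkPrefixPass, hd, ih]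
    · by_cases hm : PySem.Chars.startswith key.toList ['m','a','t','e','r','i','a','l',':'] = true
      · by_cases hex : ml = PySem.Str.lower (PySem.Str.slice key (some 9) none)
        · simp [fmkLoop, fmkExactPass, hd, hm, hex]
        · by_cases hc : (PySem.Chars.isIn (PySem.Chars.lower (PySem.List.slice key.toList (some 9) none)) ml.toList = true ∨
              PySem.Chars.startswith ml.toList (PySem.Chars.lower (PySem.List.slice key.toList (some 9) none)) = true)
          · cases fb <;> simp [fmkLoop, fmkExactPass, fmkPrefixPass, hd, hm, hex, hc, ih]
          · cases fb <;> simp [fmkLoop, fmkExactPass, fmkPrefixPass, hd, hm, hex, hc, ih]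
      · cases fb <;> simp [fmkLoop, fmkExactPass, fmkPrefixPass, hd, hm, ih]

-- ===== VERDICT (by name: the statement is the Claim_ definition above) =====
theorem find_material_key_py_spec : Claim_equal_find_material_key_py := by
  intro entity_map material _
  unfold Spec_find_material_key_py find_material_key_py find_material_key_py_alt
  rw [fmkLoop_eq]
  cases hE : fmkExactPass (PySem.Str.lower material) entity_map
  · cases hP : fmkPrefixPass (PySem.Str.lower material) entity_map <;> simp [hE, hP]
  · simp [hE]
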